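-- pv_equiv track=rewrite | github.com/ajmarin/coding | leetcode/02411_smallest_subarrays_with_maximum_bitwise_or.py | smallestSubarrays
-- ===== SOURCE A (Python) =====
-- def smallestSubarrays(nums: list[int]) -> list[int]:
--     j, n = -1, len(nums)
--     ans = [0] * n
--     for i in range(n):
--         x = nums[i]
--         ans[i] = length = 1
--         while j >= 0 and nums[j] | x != nums[j]:
--             length += 1
--             ans[j] = length
--             nums[j] |= x
--             j -= 1
--         j = i
--     return ans
-- ===== SOURCE B (Python) =====
-- def smallestSubarrays(nums: list[int]) -> list[int]:
--     # Two-phase functional rewrite: precompute suffix ORs, then for each i scan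
--     # forward for the first window reaching that OR.  Return value only: unlike
--     # the original, this does NOT mutate `nums` in place.
--     n = len(nums)
--     suf = []
--     cur = 0
--     for x in reversed(nums):
--         cur |= x
--         suf.append(cur)
--     suf.reverse()
--     ans = []
--     for i in range(n):
--         acc = 0
--         length = n - i  # whole suffix; overwritten by the first (smallest) hit
--         for k in range(i, n):
--             acc |= nums[k]
--             if acc == suf[i]:
--                 length = k - i + 1
--                 break
--         ans.append(length)
--     return ans
-- ===== Notes on version B (the rewrite author's own statement) =====
-- stated objective: alternative
-- what changed: A does one forward pass that propagates each new element's OR bits leftward in place (mutating nums) with a shared walking pointer j; B instead precomputes the suffix-OR array in a right-to-left pass and then, for each index independently, scans forward for the first window whose OR reaches that suffix OR, never mutating its input.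
import Mathlib
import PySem

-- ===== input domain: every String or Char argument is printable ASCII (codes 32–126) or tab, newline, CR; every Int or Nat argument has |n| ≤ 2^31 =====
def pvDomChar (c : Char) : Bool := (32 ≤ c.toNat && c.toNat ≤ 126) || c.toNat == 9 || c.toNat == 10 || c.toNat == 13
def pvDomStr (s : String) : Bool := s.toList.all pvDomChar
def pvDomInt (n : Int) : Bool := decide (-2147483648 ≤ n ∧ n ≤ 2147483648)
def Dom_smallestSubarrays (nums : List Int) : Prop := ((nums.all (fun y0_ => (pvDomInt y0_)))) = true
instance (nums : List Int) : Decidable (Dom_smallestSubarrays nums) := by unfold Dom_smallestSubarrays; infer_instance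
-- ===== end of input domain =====

-- B re-implements A as a two-phase pass (suffix ORs, then a fresh forward scan per index)
-- instead of A's in-place leftward OR propagation; equal return value, but B does not
-- mutate its `nums` argument in place as A does (equivalence here is about the return value).

-- ===== PORT A =====
-- the `while j >= 0 and nums[j] | x != nums[j]` loop; state (j, length, nums, ans)
def smallestSubarraysWhile (x : Int) (j : Int) (length : Int) (nums : List Int) (ans : List Int) :
    Int × List Int × List Int :=
  if h : 0 ≤ j ∧ PySem.Int.bor (nums.getD j.toNat 0) x ≠ nums.getD j.toNat 0 then
    -- length += 1; ans[j] = length; nums[j] |= x; j -= 1   (index j ≥ 0 by the guard)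
    smallestSubarraysWhile x (j - 1) (length + 1)
      (nums.set j.toNat (PySem.Int.bor (nums.getD j.toNat 0) x))
      (ans.set j.toNat (length + 1))
  else (j, nums, ans)
  termination_by (j + 1).toNat
  decreasing_by omega

-- one iteration of `for i in range(n)`
def smallestSubarraysStep (st : Int × List Int × List Int) (i : Nat) : Int × List Int × List Int :=
  let x := st.2.1.getD i 0
  let ans1 := st.2.2.set i 1      -- ans[i] = length = 1
  let r := smallestSubarraysWhile x st.1 1 st.2.1 ans1
  ((i : Int), r.2.1, r.2.2)       -- j = i

def smallestSubarrays (nums : List Int) : List Int :=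
  ((List.range nums.length).foldl smallestSubarraysStep
      (-1, nums, List.replicate nums.length 0)).2.2

-- ===== PORT B =====
-- `for x in reversed(nums): cur |= x; suf.append(cur)` then `suf.reverse()`
def smallestSubarraysSuf (nums : List Int) : List Int :=
  ((nums.reverse.foldl
      (fun (s : Int × List Int) x => (PySem.Int.bor s.1 x, s.2 ++ [PySem.Int.bor s.1 x]))
      (0, [])).2).reverse

-- `for k in range(i, n): acc |= nums[k]; if acc == suf[i]: length = k-i+1; break`
def smallestSubarraysScan (nums : List Int) (sufi : Int) (n i : Nat) (k : Nat) (acc : Int) : Int :=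
  if h : k < n then
    let acc' := PySem.Int.bor acc (nums.getD k 0)
    if acc' = sufi then (k : Int) - (i : Int) + 1
    else smallestSubarraysScan nums sufi n i (k + 1) acc'
  else (n : Int) - (i : Int)      -- default `length = n - i` (loop always breaks before this)
  termination_by n - k

def smallestSubarrays_alt (nums : List Int) : List Int :=
  let n := nums.length
  let suf := smallestSubarraysSuf nums
  (List.range n).foldl
    (fun ans i => ans ++ [smallestSubarraysScan nums (suf.getD i 0) n i i 0]) []

-- ===== PRECONDITION & SPEC =====
def Spec_smallestSubarrays (nums : List Int) (out : List Int) : Prop := out = smallestSubarrays_alt nums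
instance (nums : List Int) (out : List Int) : Decidable (Spec_smallestSubarrays nums out) := by unfold Spec_smallestSubarrays; infer_instance

-- ===== CLAIM (what is proved, stated in full; the proofs are below) =====
def Claim_equal_smallestSubarrays : Prop := ∀ (nums : List Int), Dom_smallestSubarrays nums → Spec_smallestSubarrays nums (smallestSubarrays nums)

-- ===== LEMMAS AND PROOFS =====

-- ---- bit-level algebra of Python `|` on Int (PySem.Int.bor) ----

theorem pv_ldiff_add_and (x : Nat) : ∀ n : Nat, x.ldiff n + (x &&& n) = x := by
  induction x using Nat.binaryRec with
  | zero =>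
    intro n
    have h0 : Nat.ldiff 0 n = 0 := Nat.eq_of_testBit_eq (by simp [Nat.testBit_ldiff])
    simp [h0]
  | bit a m ih =>
    intro n
    rw [← Nat.bit_testBit_zero_shiftRight_one n]
    rw [Nat.ldiff_bit, Nat.land_bit]
    rw [Nat.bit_val, Nat.bit_val, Nat.bit_val]
    have := ih (n >>> 1)
    cases a <;> cases n.testBit 0 <;> simp <;> omega

theorem pv_testBit_lim (m n : Nat) : Nat.testBit m (m + n) = false :=
  Nat.testBit_lt_two_pow (lt_of_lt_of_le (Nat.lt_two_pow_self) (Nat.pow_le_pow_right (by norm_num) (by omega)))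

theorem pv_int_testBit_ext {a b : Int} (h : ∀ k, a.testBit k = b.testBit k) : a = b := by
  cases a with
  | ofNat m =>
    cases b with
    | ofNat n =>
      have : m = n := Nat.eq_of_testBit_eq (fun k => by simpa [Int.testBit] using h k)
      simp [this]
    | negSucc n =>
      exfalso
      have hk := h (m + n)
      have h2 : Nat.testBit n (m + n) = false := by
        rw [Nat.add_comm]; exact pv_testBit_lim n m
      simp [Int.testBit, pv_testBit_lim, h2] at hk
  | negSucc m =>
    cases b with
    | ofNat n =>
      exfalso
      have hk := h (m + n)
      have h2 : Nat.testBit n (m + n) = false := by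
        rw [Nat.add_comm]; exact pv_testBit_lim n m
      simp [Int.testBit, pv_testBit_lim, h2] at hk
    | negSucc n =>
      have : m = n := Nat.eq_of_testBit_eq (fun k => by
        have := h k; simp [Int.testBit] at this; exact this)
      simp [this]

theorem pv_testBit_bor (a b : Int) (k : Nat) :
    (PySem.Int.bor a b).testBit k = (a.testBit k || b.testBit k) := by
  have key : ∀ (x y : Nat), (-(↑(x - (x &&& y)) : Int) - 1).testBit k
      = ((Int.negSucc x).testBit k || (Int.ofNat y).testBit k) := by
    intro x y
    have h4 : x - (x &&& y) = x.ldiff y := by have := pv_ldiff_add_and x y; omega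
    have h3 : -(↑(x - (x &&& y)) : Int) - 1 = Int.negSucc (x - (x &&& y)) := by
      rw [Int.negSucc_eq]; omega
    rw [h3, h4]
    simp only [Int.testBit, Nat.testBit_ldiff]
    cases Nat.testBit x k <;> cases Nat.testBit y k <;> decide
  have hnn : ∀ p : Nat, (0:Int) ≤ Int.ofNat p := fun p => Int.natCast_nonneg p
  have hns : ∀ p : Nat, ¬ (0:Int) ≤ Int.negSucc p := by intro p; rw [Int.negSucc_eq]; omega
  have htn : ∀ p : Nat, (Int.ofNat p).toNat = p := fun p => rfl
  have hneg : ∀ p : Nat, (-(Int.negSucc p) - 1).toNat = p := by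
    intro p; rw [Int.negSucc_eq]; omega
  cases a with
  | ofNat m =>
    cases b with
    | ofNat n =>
      rw [PySem.Int.bor, if_pos (hnn m), if_pos (hnn n), htn, htn]
      simp only [Int.testBit, Nat.testBit_lor]
    | negSucc n =>
      rw [PySem.Int.bor, if_pos (hnn m), if_neg (hns n), hneg, htn]
      rw [key n m]
      cases (Int.negSucc n).testBit k <;> cases (Int.ofNat m).testBit k <;> decide
  | negSucc m =>
    cases b with
    | ofNat n =>
      rw [PySem.Int.bor, if_neg (hns m), if_pos (hnn n), hneg, htn]
      rw [key m n]
    | negSucc n =>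
      rw [PySem.Int.bor, if_neg (hns m), if_neg (hns n), hneg, hneg]
      have h3 : -(↑(m &&& n) : Int) - 1 = Int.negSucc (m &&& n) := by rw [Int.negSucc_eq]; omega
      rw [h3]
      simp only [Int.testBit, Nat.testBit_land]
      cases Nat.testBit m k <;> cases Nat.testBit n k <;> decide

theorem pv_bor_assoc (a b c : Int) :
    PySem.Int.bor (PySem.Int.bor a b) c = PySem.Int.bor a (PySem.Int.bor b c) :=
  pv_int_testBit_ext (fun k => by simp [pv_testBit_bor, Bool.or_assoc])

theorem pv_bor_self (a : Int) : PySem.Int.bor a a = a :=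
  pv_int_testBit_ext (fun k => by simp [pv_testBit_bor])

theorem pv_zero_bor (a : Int) : PySem.Int.bor 0 a = a := by
  rw [PySem.Int.bor_comm]; exact PySem.Int.bor_zero a

-- ---- the OR of the half-open index window [t, k) of l ----

def orU (l : List Int) (t k : Nat) : Int :=
  ((l.take k).drop t).foldl (fun a b => PySem.Int.bor a b) 0

theorem pv_fold_bor_init (xs : List Int) (a : Int) :
    xs.foldl (fun u v => PySem.Int.bor u v) a
      = PySem.Int.bor a (xs.foldl (fun u v => PySem.Int.bor u v) 0) := by
  induction xs generalizing a with
  | nil => simp [PySem.Int.bor_zero]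
  | cons x xs ih =>
    simp only [List.foldl_cons]
    rw [ih (PySem.Int.bor a x), ih (PySem.Int.bor 0 x), pv_zero_bor, pv_bor_assoc]

theorem orU_of_le (l : List Int) {t k : Nat} (h : k ≤ t) : orU l t k = 0 := by
  unfold orU
  rw [List.drop_eq_nil_of_le (by simpa using le_trans (List.length_take_le k l) h)]
  rfl

theorem orU_of_len_le (l : List Int) {t k : Nat} (h : l.length ≤ t) : orU l t k = 0 := by
  unfold orU
  rw [List.drop_eq_nil_of_le (le_trans (by simpa using List.length_take_le' ..) h)]
  rfl

theorem orU_succ (l : List Int) {t k : Nat} (h1 : t ≤ k) (h2 : k < l.length) :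
    orU l t (k + 1) = PySem.Int.bor (orU l t k) (l.getD k 0) := by
  unfold orU
  rw [List.take_add_one, List.getElem?_eq_getElem h2]
  have hlen : t ≤ (l.take k).length := by simpa using (by omega : t ≤ min k l.length)
  rw [Option.toList_some, List.drop_append_of_le_length hlen, List.foldl_append]
  simp [List.getD, List.getElem?_eq_getElem h2]

theorem orU_succ_ge (l : List Int) {t k : Nat} (h : l.length ≤ k) :
    orU l t (k + 1) = orU l t k := by
  unfold orU
  rw [List.take_of_length_le h, List.take_of_length_le (by omega)]

theorem orU_head (l : List Int) {t k : Nat} (h1 : t < k) (h2 : t < l.length) :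
    orU l t k = PySem.Int.bor (l.getD t 0) (orU l (t + 1) k) := by
  unfold orU
  have ht : t < (l.take k).length := by simpa using (by omega : t < min k l.length)
  rw [List.drop_eq_getElem_cons ht]
  simp only [List.foldl_cons]
  rw [pv_fold_bor_init, List.getElem_take]
  simp [List.getD, List.getElem?_eq_getElem h2, pv_zero_bor]

theorem orU_mono (l : List Int) {t k m : Nat} (h : k ≤ m) :
    PySem.Int.bor (orU l t k) (orU l t m) = orU l t m := by
  induction m with
  | zero =>
    have : k = 0 := by omega
    subst this; exact pv_bor_self _
  | succ m ih =>
    rcases Nat.lt_or_ge k (m + 1) with hk | hk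
    · have hkm : k ≤ m := by omega
      rcases Nat.lt_or_ge m l.length with hm | hm
      · rcases Nat.lt_or_ge m t with hmt | hmt
        · rw [orU_of_le l (by omega : k ≤ t)]
          exact pv_zero_bor _
        · rw [orU_succ l hmt hm, ← pv_bor_assoc, ih hkm]
      · rw [orU_succ_ge l hm]
        exact ih hkm
    · have : k = m + 1 := by omega
      subst this; exact pv_bor_self _

theorem pv_absorb_down (l : List Int) (x : Int) {k : Nat} :
    ∀ (d t s : Nat), t + d = s → t ≤ s →
    PySem.Int.bor x (orU l s k) = orU l s k →
    PySem.Int.bor x (orU l t k) = orU l t k := by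
  intro d
  induction d with
  | zero => intro t s h _ hx; have : t = s := by omega
            subst this; exact hx
  | succ d ih =>
    intro t s h _ hx
    rcases Nat.lt_or_ge t k with htk | htk
    · rcases Nat.lt_or_ge t l.length with htl | htl
      · have hrec := ih (t + 1) s (by omega) (by omega) hx
        rw [orU_head l htk htl]
        rw [← pv_bor_assoc, PySem.Int.bor_comm x (l.getD t 0), pv_bor_assoc, hrec]
      · have h0 : orU l t k = 0 := orU_of_len_le l htl
        have h0' : orU l s k = 0 := orU_of_len_le l (by omega)
        rw [h0] at *
        rw [h0'] at hx
        exact hx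
    · have h0 : orU l t k = 0 := orU_of_le l htk
      have h0' : orU l s k = 0 := orU_of_le l (le_trans htk (by omega))
      rw [h0]
      rw [h0'] at hx
      exact hx

-- ---- W l t i = least k with orU l t k = orU l t i (the minimal window end, exclusive) ----

def W (l : List Int) (t : Nat) (i : Nat) : Nat :=
  if h : i ≤ t + 1 then t + 1
  else if orU l t i = orU l t (i - 1) then W l t (i - 1) else i
  termination_by i
  decreasing_by omega

theorem W_base (l : List Int) {t i : Nat} (h : i ≤ t + 1) : W l t i = t + 1 := by
  rw [W, dif_pos h]

theorem W_succ (l : List Int) {t i : Nat} (h : t < i) :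
    W l t (i + 1) = if orU l t (i + 1) = orU l t i then W l t i else i + 1 := by
  rw [W, dif_neg (by omega)]
  simp

theorem W_bounds (l : List Int) (t : Nat) : ∀ i, t + 1 ≤ W l t i ∧ W l t i ≤ max (t + 1) i := by
  intro i
  induction i using Nat.strong_induction_on with
  | _ i ih =>
    by_cases h : i ≤ t + 1
    · rw [W_base l h]; omega
    · rw [W, dif_neg h]
      split
      · have := ih (i - 1) (by omega)
        omega
      · omega

theorem W_eq (l : List Int) (t : Nat) : ∀ i, t < i → orU l t (W l t i) = orU l t i := by
  intro i hi
  induction i, hi using Nat.le_induction with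
  | base => rw [W_base l (by omega)]
  | succ i hi ih =>
    rw [W_succ l (by omega)]
    split
    · rename_i heq
      rw [ih, heq]
    · rfl

theorem W_least (l : List Int) (t : Nat) : ∀ i, t < i →
    ∀ k, t + 1 ≤ k → k < W l t i → orU l t k ≠ orU l t i := by
  intro i hi
  induction i, hi using Nat.le_induction with
  | base =>
    intro k hk1 hk2
    rw [W_base l (by omega)] at hk2
    omega
  | succ i hi ih =>
    intro k hk1 hk2 heq
    rw [W_succ l (by omega)] at hk2
    by_cases hcase : orU l t (i + 1) = orU l t i
    · rw [if_pos hcase] at hk2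
      exact ih k hk1 hk2 (heq.trans hcase)
    · rw [if_neg hcase] at hk2
      have hki : k ≤ i := by omega
      have h1 : PySem.Int.bor (orU l t k) (orU l t i) = orU l t i := orU_mono l hki
      rw [heq] at h1
      have h2 : PySem.Int.bor (orU l t i) (orU l t (i + 1)) = orU l t (i + 1) :=
        orU_mono l (by omega)
      rw [PySem.Int.bor_comm] at h1
      rw [h1] at h2
      exact hcase h2.symm

-- ---- invariant states of A's fold ----

def sN (l : List Int) (i : Nat) : List Int :=
  (List.range l.length).map (fun t => if t < i then orU l t i else l.getD t 0)

def sA (l : List Int) (i : Nat) : List Int :=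
  (List.range l.length).map (fun t => if t < i then (W l t i : Int) - t else 0)

def pN (l : List Int) (i : Nat) (j : Int) : List Int :=
  (List.range l.length).map
    (fun (t : Nat) => if (t : Int) ≤ j then orU l t i else if t ≤ i then orU l t (i + 1) else l.getD t 0)

def pA (l : List Int) (i : Nat) (j : Int) : List Int :=
  (List.range l.length).map
    (fun (t : Nat) => if (t : Int) ≤ j then (W l t i : Int) - t
              else if t ≤ i then (W l t (i + 1) : Int) - t else 0)

theorem mr_getD (f : Nat → Int) {n j : Nat} (h : j < n) :
    ((List.range n).map f).getD j 0 = f j := by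
  rw [List.getD_eq_getElem?_getD, List.getElem?_map, List.getElem?_range h]
  rfl

theorem mr_set (f : Nat → Int) {n j : Nat} (v : Int) :
    ((List.range n).map f).set j v
      = (List.range n).map (fun t => if t = j then v else f t) := by
  apply List.ext_getElem
  · simp
  · intro u h1 h2
    simp only [List.getElem_set, List.getElem_map, List.getElem_range]
    split
    · rename_i hu; simp [hu]
    · rename_i hu; simp [Ne.symm hu]

theorem mr_congr {f g : Nat → Int} {n : Nat} (h : ∀ t, t < n → f t = g t) :
    (List.range n).map f = (List.range n).map g :=
  List.map_congr_left (fun t ht => h t (List.mem_range.mp ht))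

-- ---- A's inner while loop realises the pN/pA → sN/sA transition ----

theorem W_grow (l : List Int) {t i : Nat} (h1 : t ≤ i) (h2 : orU l t (i + 1) ≠ orU l t i) :
    W l t (i + 1) = i + 1 := by
  rcases Nat.lt_or_ge t i with h | h
  · rw [W_succ l h, if_neg h2]
  · have : t = i := by omega
    subst this
    exact W_base l (by omega)

theorem whileLem (l : List Int) (i : Nat) (hi : i < l.length) :
    ∀ (d : Nat) (j : Int), (j + 1).toNat = d → -1 ≤ j → j < (i : Int) →
    (smallestSubarraysWhile (l.getD i 0) j ((i : Int) - j) (pN l i j) (pA l i j)).2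
      = (sN l (i + 1), sA l (i + 1)) := by
  intro d
  induction d using Nat.strong_induction_on with
  | _ d ih =>
    intro j hd hj1 hj2
    rw [smallestSubarraysWhile]
    by_cases hj0 : 0 ≤ j
    · have hjn : j.toNat < l.length := by omega
      have hjti : j.toNat ≤ i := by omega
      have hgd : (pN l i j).getD j.toNat 0 = orU l j.toNat i := by
        unfold pN
        rw [mr_getD _ hjn]
        rw [if_pos (by omega : ((j.toNat : Nat) : Int) ≤ j)]
      have hsucc : orU l j.toNat (i + 1) = PySem.Int.bor (orU l j.toNat i) (l.getD i 0) :=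
        orU_succ l hjti hi
      by_cases hne : orU l j.toNat (i + 1) = orU l j.toNat i
      · -- loop condition FALSE: the new bit is absorbed; exit here
        rw [dif_neg (by
          rw [hgd]
          intro hcontra
          exact hcontra.2 (by rw [← hsucc]; exact hne))]
        -- key: for every t ≤ j, orU l t (i+1) = orU l t i
        have key : ∀ t : Nat, (t : Int) ≤ j → orU l t (i + 1) = orU l t i := by
          intro t ht
          have habs : PySem.Int.bor (l.getD i 0) (orU l j.toNat i) = orU l j.toNat i := by
            rw [PySem.Int.bor_comm, ← hsucc]; exact hne
          have habs' := pv_absorb_down l (l.getD i 0) (j.toNat - t) t j.toNat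
            (by omega) (by omega) habs
          rw [orU_succ l (by omega) hi, PySem.Int.bor_comm]
          exact habs'
        simp only [Prod.mk.injEq]
        constructor
        · unfold pN sN
          apply mr_congr
          intro t ht
          by_cases h1 : (t : Int) ≤ j
          · rw [if_pos h1, if_pos (by omega : t < i + 1)]
            exact (key t h1).symm
          · rw [if_neg h1]
            by_cases h2 : t ≤ i
            · rw [if_pos h2, if_pos (by omega : t < i + 1)]
            · rw [if_neg h2, if_neg (by omega : ¬ t < i + 1)]
        · unfold pA sA
          apply mr_congr
          intro t ht
          by_cases h1 : (t : Int) ≤ j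
          · rw [if_pos h1, if_pos (by omega : t < i + 1)]
            have : W l t (i + 1) = W l t i := by
              rw [W_succ l (by omega : t < i), if_pos (key t h1)]
            rw [this]
          · rw [if_neg h1]
            by_cases h2 : t ≤ i
            · rw [if_pos h2, if_pos (by omega : t < i + 1)]
            · rw [if_neg h2, if_neg (by omega : ¬ t < i + 1)]
      · -- loop condition TRUE: write ans[j], or x into nums[j], step left
        rw [dif_pos (by
          rw [hgd]
          exact ⟨hj0, by rw [← hsucc]; exact hne⟩)]
        have hsetN : (pN l i j).set j.toNat
              (PySem.Int.bor ((pN l i j).getD j.toNat 0) (l.getD i 0)) = pN l i (j - 1) := by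
          rw [hgd, ← hsucc]
          unfold pN
          rw [mr_set]
          apply mr_congr
          intro t ht
          by_cases h1 : t = j.toNat
          · subst h1
            rw [if_pos rfl, if_neg (by omega : ¬ ((j.toNat : Nat) : Int) ≤ j - 1), if_pos hjti]
          · rw [if_neg h1]
            by_cases h2 : (t : Int) ≤ j - 1
            · rw [if_pos h2, if_pos (by omega : (t : Int) ≤ j)]
            · rw [if_neg h2, if_neg (by omega : ¬ (t : Int) ≤ j)]
        have hW : W l j.toNat (i + 1) = i + 1 := W_grow l hjti hne
        have hsetA : (pA l i j).set j.toNat ((i : Int) - j + 1) = pA l i (j - 1) := by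
          unfold pA
          rw [mr_set]
          apply mr_congr
          intro t ht
          by_cases h1 : t = j.toNat
          · subst h1
            rw [if_pos rfl, if_neg (by omega : ¬ ((j.toNat : Nat) : Int) ≤ j - 1), if_pos hjti, hW]
            push_cast
            omega
          · rw [if_neg h1]
            by_cases h2 : (t : Int) ≤ j - 1
            · rw [if_pos h2, if_pos (by omega : (t : Int) ≤ j)]
            · rw [if_neg h2, if_neg (by omega : ¬ (t : Int) ≤ j)]
        rw [hsetN, hsetA]
        have hlen : (i : Int) - j + 1 = (i : Int) - (j - 1) := by ring
        rw [hlen]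
        exact ih (j - 1 + 1).toNat (by omega) (j - 1) rfl (by omega) (by omega)
    · -- j = -1 on entry: loop does not run
      rw [dif_neg (by intro hcontra; exact hj0 hcontra.1)]
      have hj : j = -1 := by omega
      subst hj
      simp only [Prod.mk.injEq]
      constructor
      · unfold pN sN
        apply mr_congr
        intro t ht
        rw [if_neg (by omega : ¬ (t : Int) ≤ -1)]
        by_cases h2 : t ≤ i
        · rw [if_pos h2, if_pos (by omega : t < i + 1)]
        · rw [if_neg h2, if_neg (by omega : ¬ t < i + 1)]
      · unfold pA sA
        apply mr_congr
        intro t ht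
        rw [if_neg (by omega : ¬ (t : Int) ≤ -1)]
        by_cases h2 : t ≤ i
        · rw [if_pos h2, if_pos (by omega : t < i + 1)]
        · rw [if_neg h2, if_neg (by omega : ¬ t < i + 1)]

-- ---- A's outer fold invariant ----

theorem mr_getD_id (l : List Int) :
    (List.range l.length).map (fun t => l.getD t 0) = l := by
  apply List.ext_getElem
  · simp
  · intro u h1 h2
    simp only [List.getElem_map, List.getElem_range]
    rw [List.getD_eq_getElem?_getD, List.getElem?_eq_getElem h2]
    rfl

theorem outerLem (l : List Int) :
    ∀ i, i ≤ l.length →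
    (List.range i).foldl smallestSubarraysStep (-1, l, List.replicate l.length 0)
      = ((i : Int) - 1, sN l i, sA l i) := by
  intro i
  induction i with
  | zero =>
    intro _
    simp only [List.range_zero, List.foldl_nil]
    have hN : sN l 0 = l := by
      unfold sN
      rw [mr_congr (g := fun t => l.getD t 0) (fun t ht => by rw [if_neg (by omega)])]
      exact mr_getD_id l
    have hA : sA l 0 = List.replicate l.length 0 := by
      unfold sA
      apply List.ext_getElem
      · simp
      · intro u h1 h2
        simp [List.getElem_replicate]
    rw [hN, hA]
    norm_num
  | succ i ih =>
    intro hle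
    have hi : i < l.length := by omega
    rw [List.range_succ, List.foldl_append, ih (by omega), List.foldl_cons, List.foldl_nil]
    have hx : (sN l i).getD i 0 = l.getD i 0 := by
      unfold sN
      rw [mr_getD _ hi, if_neg (lt_irrefl i)]
    have hans : (sA l i).set i 1 = pA l i ((i : Int) - 1) := by
      unfold sA pA
      rw [mr_set]
      apply mr_congr
      intro t ht
      by_cases h1 : t = i
      · subst h1
        rw [if_pos rfl, if_neg (by omega : ¬ ((t : Nat) : Int) ≤ (t : Int) - 1),
          if_pos (le_refl t), W_base l (by omega)]
        push_cast
        omega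
      · rw [if_neg h1]
        by_cases h2 : (t : Int) ≤ (i : Int) - 1
        · rw [if_pos (by omega : t < i), if_pos h2]
        · rw [if_neg (by omega : ¬ t < i), if_neg h2, if_neg (by omega : ¬ t ≤ i)]
    have hnums : sN l i = pN l i ((i : Int) - 1) := by
      unfold sN pN
      apply mr_congr
      intro t ht
      by_cases h1 : t < i
      · rw [if_pos h1, if_pos (by omega : (t : Int) ≤ (i : Int) - 1)]
      · rw [if_neg h1, if_neg (by omega : ¬ (t : Int) ≤ (i : Int) - 1)]
        by_cases h2 : t = i
        · subst h2
          rw [if_pos (le_refl t), orU_succ l (le_refl t) hi, orU_of_le l (le_refl t), pv_zero_bor]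
        · rw [if_neg (by omega : ¬ t ≤ i)]
    show ((i : Int),
        (smallestSubarraysWhile ((sN l i).getD i 0) ((i : Int) - 1) 1 (sN l i) ((sA l i).set i 1)).2.1,
        (smallestSubarraysWhile ((sN l i).getD i 0) ((i : Int) - 1) 1 (sN l i) ((sA l i).set i 1)).2.2)
      = (((i : Nat) + 1 : Int) - 1, sN l (i + 1), sA l (i + 1))
    rw [hx, hans, hnums]
    have hres := whileLem l i hi ((i : Int) - 1 + 1).toNat ((i : Int) - 1) rfl (by omega) (by omega)
    rw [show (i : Int) - ((i : Int) - 1) = 1 from by ring] at hres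
    have hfst : (smallestSubarraysWhile (l.getD i 0) ((i : Int) - 1) 1
        (pN l i ((i : Int) - 1)) (pA l i ((i : Int) - 1))).2.1 = sN l (i + 1) := by
      rw [hres]
    have hsnd : (smallestSubarraysWhile (l.getD i 0) ((i : Int) - 1) 1
        (pN l i ((i : Int) - 1)) (pA l i ((i : Int) - 1))).2.2 = sA l (i + 1) := by
      rw [hres]
    rw [hfst, hsnd]
    norm_num

-- ---- B's suffix list and scan ----

-- partial OR prefixes produced by B's reversed fold
def Fs (r : List Int) (a : Int) : List Int :=
  (List.range r.length).map (fun m => (r.take (m + 1)).foldl (fun u v => PySem.Int.bor u v) a)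

theorem Fs_cons (x : Int) (r : List Int) (a : Int) :
    Fs (x :: r) a = PySem.Int.bor a x :: Fs r (PySem.Int.bor a x) := by
  unfold Fs
  simp only [List.length_cons, List.range_succ_eq_map, List.map_cons, List.map_map]
  rfl

theorem fold_build : ∀ (r : List Int) (a : Int) (acc : List Int),
    r.foldl (fun (s : Int × List Int) x => (PySem.Int.bor s.1 x, s.2 ++ [PySem.Int.bor s.1 x])) (a, acc)
      = (r.foldl (fun u v => PySem.Int.bor u v) a, acc ++ Fs r a) := by
  intro r
  induction r with
  | nil => intro a acc; simp [Fs]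
  | cons x r ih =>
    intro a acc
    simp only [List.foldl_cons]
    rw [ih (PySem.Int.bor a x) (acc ++ [PySem.Int.bor a x])]
    rw [Fs_cons]
    simp

theorem pv_fold_bor_rev (xs : List Int) :
    xs.foldr (fun x y => PySem.Int.bor y x) 0 = xs.foldl (fun u v => PySem.Int.bor u v) 0 := by
  induction xs with
  | nil => rfl
  | cons x xs ih =>
    simp only [List.foldr_cons, List.foldl_cons]
    rw [ih, pv_fold_bor_init _ (PySem.Int.bor 0 x), pv_zero_bor, PySem.Int.bor_comm]

theorem orU_drop (l : List Int) (t : Nat) :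
    orU l t l.length = (l.drop t).foldl (fun u v => PySem.Int.bor u v) 0 := by
  unfold orU
  rw [List.take_length]

theorem sufLem (l : List Int) :
    smallestSubarraysSuf l = (List.range l.length).map (fun t => orU l t l.length) := by
  unfold smallestSubarraysSuf
  rw [fold_build l.reverse 0 []]
  simp only [List.nil_append]
  apply List.ext_getElem
  · simp [Fs]
  · intro u h1 h2
    simp only [List.length_reverse, List.length_map, List.length_range] at h2 ⊢
    have h1' : u < l.length := h2
    rw [List.getElem_reverse]
    unfold Fs
    simp only [List.length_map, List.length_range] at *
    rw [List.getElem_map, List.getElem_range, List.getElem_map, List.getElem_range]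
    rw [List.take_reverse, List.foldl_reverse, pv_fold_bor_rev, ← orU_drop]
    congr 1
    simp only [List.length_reverse]
    omega

theorem scanLem (l : List Int) {i : Nat} (hi : i < l.length) :
    ∀ d k, l.length - k = d → i ≤ k → k + 1 ≤ W l i l.length →
    smallestSubarraysScan l (orU l i l.length) l.length i k (orU l i k)
      = (W l i l.length : Int) - i := by
  intro d
  induction d with
  | zero =>
    intro k hd _ hW
    have hWle : W l i l.length ≤ l.length := by
      have := W_bounds l i l.length
      omega
    omega
  | succ d ih =>
    intro k hd hik hW
    have hWle : W l i l.length ≤ l.length := by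
      have := W_bounds l i l.length
      omega
    have hkn : k < l.length := by omega
    rw [smallestSubarraysScan, dif_pos hkn]
    simp only
    rw [← orU_succ l hik hkn]
    by_cases hc : orU l i (k + 1) = orU l i l.length
    · rw [if_pos hc]
      have : ¬ (k + 1 < W l i l.length) := by
        intro hlt
        exact W_least l i l.length hi (k + 1) (by omega) hlt hc
      have hkW : k + 1 = W l i l.length := by omega
      rw [← hkW]
      push_cast
      ring
    · rw [if_neg hc]
      have hne : k + 1 ≠ W l i l.length := by
        intro he
        exact hc (he ▸ W_eq l i l.length hi)
      exact ih (k + 1) (by omega) (by omega) (by omega)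

theorem foldl_app_singleton (g : Nat → Int) :
    ∀ (L : List Nat) (acc : List Int),
    L.foldl (fun a i => a ++ [g i]) acc = acc ++ L.map g := by
  intro L
  induction L with
  | nil => intro acc; simp
  | cons x L ih =>
    intro acc
    simp only [List.foldl_cons, List.map_cons]
    rw [ih]
    simp

theorem altLem (l : List Int) : smallestSubarrays_alt l = sA l l.length := by
  unfold smallestSubarrays_alt
  simp only
  rw [foldl_app_singleton]
  simp only [List.nil_append]
  unfold sA
  apply mr_congr
  intro t ht
  rw [if_pos ht]
  rw [sufLem, mr_getD _ ht]
  have h0 : (0 : Int) = orU l t t := (orU_of_le l (le_refl t)).symm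
  rw [h0]
  exact scanLem l ht (l.length - t) t rfl (le_refl t) (by have := W_bounds l t l.length; omega)

-- ===== VERDICT (by name: the statement is the Claim_ definition above) =====
theorem smallestSubarrays_spec : Claim_equal_smallestSubarrays := by
  intro nums _
  unfold Spec_smallestSubarrays
  rw [altLem]
  unfold smallestSubarrays
  rw [outerLem nums nums.length (le_refl _)]
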